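-- pv_equiv track=rewrite | github.com/ceeb-ia/ceeb_web | competicions_trampoli/views.py | arrow_positions
-- ===== SOURCE A (Python) =====
-- def arrow_positions(n: int) -> list[int]:
--     """
--     Retorna la seqüència de posicions "fletxa" per un grup de mida n.
--
--     Exemple n=8 -> [3,4,2,5,1,6,0,7]
--     (index del registre ordenat) -> (posició dins del grup)
--     """
--     if n <= 0:
--         return []
--
--     seq = []
--     if n % 2 == 0:
--         left = n // 2 - 1
--         right = n // 2
--         while left >= 0 or right < n:
--             if left >= 0:
--                 seq.append(left)
--                 left -= 1
--             if right < n: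
--                 seq.append(right)
--                 right += 1
--     else:
--         center = n // 2
--         seq.append(center)
--         step = 1
--         while center - step >= 0 or center + step < n:
--             if center - step >= 0:
--                 seq.append(center - step)
--             if center + step < n:
--                 seq.append(center + step)
--             step += 1
--
--     return seq
-- ===== SOURCE B (Python) =====
-- def arrow_positions(n: int) -> list[int]:
--     # Sort all indices by their doubled distance from the center, ties
--     # broken toward the smaller (left) index.
--     return sorted(range(n), key=lambda i: (abs(2 * i - (n - 1)), i))
-- ===== Notes on version B (the rewrite author's own statement) =====
-- stated objective: simpler
-- what changed: Replaces the parity-split two-pointer interleaving loops with a single sort of range(n) by the key (abs(2*i-(n-1)), i) (doubled distance from the center, left index first on ties).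
import Mathlib
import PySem

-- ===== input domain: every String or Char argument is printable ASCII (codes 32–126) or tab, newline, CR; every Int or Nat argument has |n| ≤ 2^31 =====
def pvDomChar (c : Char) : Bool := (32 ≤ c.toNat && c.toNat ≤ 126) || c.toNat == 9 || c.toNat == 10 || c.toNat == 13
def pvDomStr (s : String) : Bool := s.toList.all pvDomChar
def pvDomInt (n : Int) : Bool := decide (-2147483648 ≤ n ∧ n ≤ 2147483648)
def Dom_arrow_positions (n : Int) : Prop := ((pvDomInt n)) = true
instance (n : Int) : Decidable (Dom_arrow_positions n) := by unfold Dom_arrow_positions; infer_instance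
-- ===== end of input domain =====

-- B replaces A's parity-split two-pointer interleaving loops with a single sort of range(n)
-- by the key (abs(2*i-(n-1)), i); same result, a simpler one-line algorithm.

-- ===== PORT A =====
-- the even-n while loop: state (left, right, seq)
def arrowEvenLoop (n left right : Int) (seq : List Int) : List Int :=
  if h : left ≥ 0 ∨ right < n then
    let p1 : List Int × Int := if left ≥ 0 then (seq ++ [left], left - 1) else (seq, left)
    let p2 : List Int × Int := if right < n then (p1.1 ++ [right], right + 1) else (p1.1, right)
    arrowEvenLoop n p1.2 p2.2 p2.1
  else seq
termination_by ((left + 1).toNat + (n - right).toNat)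
decreasing_by
  split_ifs <;> simp_all <;> omega

-- the odd-n while loop: state (step, seq); center is fixed
def arrowOddLoop (n center step : Int) (seq : List Int) : List Int :=
  if h : center - step ≥ 0 ∨ center + step < n then
    let s1 : List Int := if center - step ≥ 0 then seq ++ [center - step] else seq
    let s2 : List Int := if center + step < n then s1 ++ [center + step] else s1
    arrowOddLoop n center (step + 1) s2
  else seq
termination_by ((center - step + 1).toNat + (n - center - step).toNat)
decreasing_by
  omega

def arrow_positions (n : Int) : List Int :=
  if n ≤ 0 then []
  else if PySem.Int.mod n 2 == 0 then
    arrowEvenLoop n (PySem.Int.floordiv n 2 - 1) (PySem.Int.floordiv n 2) []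
  else
    let center := PySem.Int.floordiv n 2
    arrowOddLoop n center 1 [center]

-- ===== PORT B =====
-- sorted(range(n), key=lambda i: (abs(2*i-(n-1)), i)) — PySem.List.sorted2 is the tuple-key sorted
def arrow_positions_alt (n : Int) : List Int :=
  PySem.List.sorted2 (PySem.List.pyRange 0 n 1) (fun i => |2 * i - (n - 1)|) (fun i => i)

-- ===== PRECONDITION & SPEC =====
def Spec_arrow_positions (n : Int) (out : List Int) : Prop := out = arrow_positions_alt n
instance (n : Int) (out : List Int) : Decidable (Spec_arrow_positions n out) := by unfold Spec_arrow_positions; infer_instance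

-- ===== CLAIM =====
def Claim_equal_arrow_positions : Prop := ∀ (n : Int), Dom_arrow_positions n → Spec_arrow_positions n (arrow_positions n)

-- ===== LEMMAS AND PROOFS =====
lemma arrowEvenLoop_closed (m : Int) : ∀ (j : Int) (seq : List Int),
    arrowEvenLoop (2 * m + 2) (m - j) (m + 1 + j) seq
      = seq ++ (PySem.List.pyRange j (m + 1) 1).flatMap (fun k => [m - k, m + 1 + k]) := by
  intro j
  by_cases hj : j ≤ m
  · have hlt : (m - j + 1).toNat + (2 * m + 2 - (m + 1 + j)).toNat
        < (m - (j - 1) + 1).toNat + (2 * m + 2 - (m + 1 + (j - 1))).toNat := by omega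
    intro seq
    rw [arrowEvenLoop.eq_def]
    have hr : PySem.List.pyRange j (m + 1) 1 = j :: PySem.List.pyRange (j + 1) (m + 1) 1 :=
      PySem.List.pyRange_one_cons (by omega)
    have h1 : m - j ≥ 0 := by omega
    have h2 : m + 1 + j < 2 * m + 2 := by omega
    rw [dif_pos (Or.inl h1)]
    simp only [if_pos h1, if_pos h2]
    have := arrowEvenLoop_closed m (j + 1) (seq ++ [m - j] ++ [m + 1 + j])
    have harg : m - j - 1 = m - (j + 1) := by ring
    have harg2 : m + 1 + j + 1 = m + 1 + (j + 1) := by ring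
    rw [harg, harg2, this, hr]
    simp
  · intro seq
    rw [arrowEvenLoop.eq_def]
    rw [dif_neg (by omega)]
    rw [PySem.List.pyRange_one_eq_nil (by omega)]
    simp
termination_by j => (m - j + 1).toNat
decreasing_by omega

lemma arrowOddLoop_closed (m : Int) : ∀ (j : Int) (seq : List Int),
    arrowOddLoop (2 * m + 1) m j seq
      = seq ++ (PySem.List.pyRange j (m + 1) 1).flatMap (fun k => [m - k, m + k]) := by
  intro j
  by_cases hj : j ≤ m
  · intro seq
    rw [arrowOddLoop.eq_def]
    have hr : PySem.List.pyRange j (m + 1) 1 = j :: PySem.List.pyRange (j + 1) (m + 1) 1 :=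
      PySem.List.pyRange_one_cons (by omega)
    have h1 : m - j ≥ 0 := by omega
    have h2 : m + j < 2 * m + 1 := by omega
    rw [dif_pos (Or.inl h1)]
    simp only [if_pos h1, if_pos h2]
    rw [arrowOddLoop_closed m (j + 1) (seq ++ [m - j] ++ [m + j]), hr]
    simp
  · intro seq
    rw [arrowOddLoop.eq_def]
    rw [dif_neg (by omega)]
    rw [PySem.List.pyRange_one_eq_nil (by omega)]
    simp
termination_by j => (m - j + 1).toNat
decreasing_by omega

-- sorted2 with Int keys is sorted by the lexicographic pair key
lemma sorted2_eq_sorted_lex (xs : List Int) (k1 k2 : Int → Int) :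
    PySem.List.sorted2 xs k1 k2
      = PySem.List.sorted xs (fun i => toLex ((k1 i, k2 i) : Int × Int)) := by
  have hfun : (fun (a b : Int) => decide (k1 a < k1 b) || (!decide (k1 b < k1 a) && decide (k2 a < k2 b)))
      = (fun (a b : Int) => decide (toLex ((k1 a, k2 a) : Int × Int) < toLex ((k1 b, k2 b) : Int × Int))) := by
    funext a b
    have hiff : (toLex ((k1 a, k2 a) : Int × Int) < toLex ((k1 b, k2 b) : Int × Int))
        ↔ (k1 a < k1 b ∨ (k1 a = k1 b ∧ k2 a < k2 b)) := Prod.Lex.lt_iff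
    rw [Bool.eq_iff_iff]
    simp only [Bool.or_eq_true, Bool.and_eq_true, Bool.not_eq_true', decide_eq_true_eq,
      decide_eq_false_iff_not, hiff]
    omega
  show List.foldl (fun acc x => PySem.List.insertBy
      (fun a b => decide (k1 a < k1 b) || (!decide (k1 b < k1 a) && decide (k2 a < k2 b))) x acc) [] xs
    = List.foldl (fun acc x => PySem.List.insertBy
      (fun a b => decide (toLex ((k1 a, k2 a) : Int × Int) < toLex ((k1 b, k2 b) : Int × Int))) x acc) [] xs
  rw [hfun]

-- a strictly lex-increasing rearrangement of xs IS sorted2(xs, k1, k2)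
lemma sorted2_eq_of_perm_of_pairwise (xs ys : List Int) (k1 k2 : Int → Int)
    (hp : ys.Perm xs)
    (hpw : ys.Pairwise (fun a b => k1 a < k1 b ∨ (k1 a = k1 b ∧ k2 a < k2 b))) :
    PySem.List.sorted2 xs k1 k2 = ys := by
  rw [sorted2_eq_sorted_lex]
  refine PySem.List.sorted_eq_of_perm_of_pairwise_lt _ _ _ hp ?_
  exact hpw.imp (fun h => Prod.Lex.lt_iff.mpr h)

-- every element of the even-n tail from offset j has key at least 2j+1
lemma even_key_lb (m j : Int) (hj0 : 0 ≤ j) (x : Int)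
    (hx : x ∈ (PySem.List.pyRange j (m + 1) 1).flatMap (fun k => [m - k, m + 1 + k])) :
    2 * j + 1 ≤ |2 * x - (2 * m + 1)| := by
  rw [List.mem_flatMap] at hx
  obtain ⟨k, hk, hxk⟩ := hx
  rw [PySem.List.mem_pyRange_one] at hk
  simp only [List.mem_cons, List.not_mem_nil, or_false] at hxk
  rcases hxk with rfl | rfl
  · rw [abs_of_neg (show (2 * (m - k) - (2 * m + 1) : Int) < 0 by omega)]
    omega
  · rw [abs_of_nonneg (show (0 : Int) ≤ 2 * (m + 1 + k) - (2 * m + 1) by omega)]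
    omega

lemma even_pairwise (m : Int) : ∀ (j : Int), 0 ≤ j →
    ((PySem.List.pyRange j (m + 1) 1).flatMap (fun k => [m - k, m + 1 + k])).Pairwise
      (fun a b => |2 * a - (2 * m + 1)| < |2 * b - (2 * m + 1)|
        ∨ (|2 * a - (2 * m + 1)| = |2 * b - (2 * m + 1)| ∧ a < b)) := by
  intro j hj0
  by_cases hj : j ≤ m
  · rw [PySem.List.pyRange_one_cons (show j < m + 1 by omega)]
    have ih := even_pairwise m (j + 1) (by omega)
    simp only [List.flatMap_cons, List.cons_append, List.nil_append]
    refine List.Pairwise.cons ?_ (List.Pairwise.cons ?_ ih)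
    · intro x hx
      rw [List.mem_cons] at hx
      rcases hx with rfl | hx
      · right
        refine ⟨?_, by omega⟩
        rw [abs_of_neg (show (2 * (m - j) - (2 * m + 1) : Int) < 0 by omega),
          abs_of_nonneg (show (0 : Int) ≤ 2 * (m + 1 + j) - (2 * m + 1) by omega)]
        omega
      · left
        have hlb := even_key_lb m (j + 1) (by omega) x hx
        rw [abs_of_neg (show (2 * (m - j) - (2 * m + 1) : Int) < 0 by omega)]
        omega
    · intro x hx
      left
      have hlb := even_key_lb m (j + 1) (by omega) x hx
      rw [abs_of_nonneg (show (0 : Int) ≤ 2 * (m + 1 + j) - (2 * m + 1) by omega)]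
      omega
  · rw [PySem.List.pyRange_one_eq_nil (by omega)]
    simp
termination_by j => (m - j + 1).toNat
decreasing_by omega

lemma even_perm (m : Int) : ∀ (j : Int),
    ((PySem.List.pyRange j (m + 1) 1).flatMap (fun k => [m - k, m + 1 + k])).Perm
      (PySem.List.pyRange 0 (m - j + 1) 1 ++ PySem.List.pyRange (m + 1 + j) (2 * m + 2) 1) := by
  intro j
  by_cases hj : j ≤ m
  · rw [PySem.List.pyRange_one_cons (show j < m + 1 by omega)]
    have ih := even_perm m (j + 1)
    rw [show m - (j + 1) + 1 = m - j by ring, show m + 1 + (j + 1) = m + 1 + j + 1 by ring] at ih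
    simp only [List.flatMap_cons, List.cons_append, List.nil_append]
    have e1 : PySem.List.pyRange 0 (m - j + 1) 1
        = PySem.List.pyRange 0 (m - j) 1 ++ [m - j] := by
      rw [show m - j + 1 = (m - j) + 1 by ring]
      exact PySem.List.pyRange_one_succ_right (by omega)
    have e2 : PySem.List.pyRange (m + 1 + j) (2 * m + 2) 1
        = (m + 1 + j) :: PySem.List.pyRange (m + 1 + j + 1) (2 * m + 2) 1 :=
      PySem.List.pyRange_one_cons (by omega)
    rw [e1, e2]
    have heq : PySem.List.pyRange 0 (m - j) 1 ++ [m - j]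
          ++ (m + 1 + j) :: PySem.List.pyRange (m + 1 + j + 1) (2 * m + 2) 1
        = PySem.List.pyRange 0 (m - j) 1
          ++ (m - j) :: (m + 1 + j) :: PySem.List.pyRange (m + 1 + j + 1) (2 * m + 2) 1 := by
      simp
    rw [heq]
    refine List.Perm.trans ((ih.cons (m + 1 + j)).cons (m - j)) ?_
    refine List.Perm.symm (List.Perm.trans List.perm_middle ?_)
    exact List.Perm.cons (m - j) List.perm_middle
  · rw [PySem.List.pyRange_one_eq_nil (show (m + 1 : Int) ≤ j by omega),
      PySem.List.pyRange_one_eq_nil (show (m - j + 1 : Int) ≤ 0 by omega),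
      PySem.List.pyRange_one_eq_nil (show (2 * m + 2 : Int) ≤ m + 1 + j by omega)]
    simp
termination_by j => (m - j + 1).toNat
decreasing_by omega

-- odd-n analogues
lemma odd_key_lb (m j : Int) (hj1 : 1 ≤ j) (x : Int)
    (hx : x ∈ (PySem.List.pyRange j (m + 1) 1).flatMap (fun k => [m - k, m + k])) :
    2 * j ≤ |2 * x - 2 * m| := by
  rw [List.mem_flatMap] at hx
  obtain ⟨k, hk, hxk⟩ := hx
  rw [PySem.List.mem_pyRange_one] at hk
  simp only [List.mem_cons, List.not_mem_nil, or_false] at hxk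
  rcases hxk with rfl | rfl
  · rw [abs_of_neg (show (2 * (m - k) - 2 * m : Int) < 0 by omega)]
    omega
  · rw [abs_of_nonneg (show (0 : Int) ≤ 2 * (m + k) - 2 * m by omega)]
    omega

lemma odd_pairwise (m : Int) : ∀ (j : Int), 1 ≤ j →
    ((PySem.List.pyRange j (m + 1) 1).flatMap (fun k => [m - k, m + k])).Pairwise
      (fun a b => |2 * a - 2 * m| < |2 * b - 2 * m|
        ∨ (|2 * a - 2 * m| = |2 * b - 2 * m| ∧ a < b)) := by
  intro j hj1
  by_cases hj : j ≤ m
  · rw [PySem.List.pyRange_one_cons (show j < m + 1 by omega)]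
    have ih := odd_pairwise m (j + 1) (by omega)
    simp only [List.flatMap_cons, List.cons_append, List.nil_append]
    refine List.Pairwise.cons ?_ (List.Pairwise.cons ?_ ih)
    · intro x hx
      rw [List.mem_cons] at hx
      rcases hx with rfl | hx
      · right
        refine ⟨?_, by omega⟩
        rw [abs_of_neg (show (2 * (m - j) - 2 * m : Int) < 0 by omega),
          abs_of_nonneg (show (0 : Int) ≤ 2 * (m + j) - 2 * m by omega)]
        omega
      · left
        have hlb := odd_key_lb m (j + 1) (by omega) x hx
        rw [abs_of_neg (show (2 * (m - j) - 2 * m : Int) < 0 by omega)]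
        omega
    · intro x hx
      left
      have hlb := odd_key_lb m (j + 1) (by omega) x hx
      rw [abs_of_nonneg (show (0 : Int) ≤ 2 * (m + j) - 2 * m by omega)]
      omega
  · rw [PySem.List.pyRange_one_eq_nil (by omega)]
    simp
termination_by j => (m - j + 1).toNat
decreasing_by omega

lemma odd_perm (m : Int) : ∀ (j : Int),
    ((PySem.List.pyRange j (m + 1) 1).flatMap (fun k => [m - k, m + k])).Perm
      (PySem.List.pyRange 0 (m - j + 1) 1 ++ PySem.List.pyRange (m + j) (2 * m + 1) 1) := by
  intro j
  by_cases hj : j ≤ m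
  · rw [PySem.List.pyRange_one_cons (show j < m + 1 by omega)]
    have ih := odd_perm m (j + 1)
    rw [show m - (j + 1) + 1 = m - j by ring, show m + (j + 1) = m + j + 1 by ring] at ih
    simp only [List.flatMap_cons, List.cons_append, List.nil_append]
    have e1 : PySem.List.pyRange 0 (m - j + 1) 1
        = PySem.List.pyRange 0 (m - j) 1 ++ [m - j] := by
      rw [show m - j + 1 = (m - j) + 1 by ring]
      exact PySem.List.pyRange_one_succ_right (by omega)
    have e2 : PySem.List.pyRange (m + j) (2 * m + 1) 1
        = (m + j) :: PySem.List.pyRange (m + j + 1) (2 * m + 1) 1 :=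
      PySem.List.pyRange_one_cons (by omega)
    rw [e1, e2]
    have heq : PySem.List.pyRange 0 (m - j) 1 ++ [m - j]
          ++ (m + j) :: PySem.List.pyRange (m + j + 1) (2 * m + 1) 1
        = PySem.List.pyRange 0 (m - j) 1
          ++ (m - j) :: (m + j) :: PySem.List.pyRange (m + j + 1) (2 * m + 1) 1 := by
      simp
    rw [heq]
    refine List.Perm.trans ((ih.cons (m + j)).cons (m - j)) ?_
    refine List.Perm.symm (List.Perm.trans List.perm_middle ?_)
    exact List.Perm.cons (m - j) List.perm_middle
  · rw [PySem.List.pyRange_one_eq_nil (show (m + 1 : Int) ≤ j by omega),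
      PySem.List.pyRange_one_eq_nil (show (m - j + 1 : Int) ≤ 0 by omega),
      PySem.List.pyRange_one_eq_nil (show (2 * m + 1 : Int) ≤ m + j by omega)]
    simp
termination_by j => (m - j + 1).toNat
decreasing_by omega

-- ===== VERDICT =====
theorem arrow_positions_spec : Claim_equal_arrow_positions := by
  intro n _
  unfold Spec_arrow_positions arrow_positions arrow_positions_alt
  by_cases hn : n ≤ 0
  · rw [if_pos hn, PySem.List.pyRange_one_eq_nil hn]
    rfl
  · rw [if_neg hn]
    have hmod : PySem.Int.mod n 2 = n % 2 := PySem.Int.mod_eq_emod_of_pos (by omega)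
    have hdiv : PySem.Int.floordiv n 2 = n / 2 := PySem.Int.floordiv_eq_ediv_of_pos (by omega)
    by_cases he : n % 2 = 0
    · -- even
      obtain ⟨m, rfl⟩ : ∃ m, n = 2 * m + 2 := ⟨n / 2 - 1, by omega⟩
      have h1 : PySem.Int.floordiv (2 * m + 2) 2 - 1 = m := by rw [hdiv]; omega
      have h2 : PySem.Int.floordiv (2 * m + 2) 2 = m + 1 := by rw [hdiv]; omega
      have hyes : (PySem.Int.mod (2 * m + 2) 2 == 0) = true := by
        rw [hmod]; simp only [beq_iff_eq]; omega
      rw [if_pos hyes, h1, h2]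
      have hA := arrowEvenLoop_closed m 0 []
      rw [show m - 0 = m by ring, show m + 1 + 0 = m + 1 by ring] at hA
      rw [hA, List.nil_append]
      rw [show (2 * m + 2 - 1 : Int) = 2 * m + 1 by ring]
      refine (sorted2_eq_of_perm_of_pairwise _ _ _ _ ?_ ?_).symm
      · have hp := even_perm m 0
        rw [show m - 0 + 1 = m + 1 by ring, show m + 1 + 0 = m + 1 by ring,
          ← PySem.List.pyRange_one_append 0 (m + 1) (2 * m + 2) (by omega) (by omega)] at hp
        exact hp
      · exact even_pairwise m 0 le_rfl
    · -- odd
      obtain ⟨m, rfl⟩ : ∃ m, n = 2 * m + 1 := ⟨n / 2, by omega⟩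
      have h2 : PySem.Int.floordiv (2 * m + 1) 2 = m := by rw [hdiv]; omega
      have hne : ¬ (PySem.Int.mod (2 * m + 1) 2 == 0) = true := by
        rw [hmod]; simp only [beq_iff_eq]; omega
      rw [if_neg hne, h2, arrowOddLoop_closed m 1 [m], List.singleton_append]
      rw [show (2 * m + 1 - 1 : Int) = 2 * m by ring]
      refine (sorted2_eq_of_perm_of_pairwise _ _ _ _ ?_ ?_).symm
      · have hp := odd_perm m 1
        rw [show m - 1 + 1 = m by ring, show m + 1 = m + 1 by ring] at hp
        have e0 : PySem.List.pyRange 0 (2 * m + 1) 1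
            = PySem.List.pyRange 0 m 1 ++ PySem.List.pyRange m (2 * m + 1) 1 :=
          PySem.List.pyRange_one_append 0 m (2 * m + 1) (by omega) (by omega)
        have e2 : PySem.List.pyRange m (2 * m + 1) 1
            = m :: PySem.List.pyRange (m + 1) (2 * m + 1) 1 :=
          PySem.List.pyRange_one_cons (by omega)
        rw [e0, e2]
        exact (hp.cons m).trans List.perm_middle.symm
      · refine List.Pairwise.cons ?_ (odd_pairwise m 1 le_rfl)
        intro x hx
        left
        have hlb := odd_key_lb m 1 le_rfl x hx
        rw [abs_of_nonneg (show (0 : Int) ≤ 2 * m - 2 * m by omega)]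
        omega
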